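-- pv_equiv track=rewrite | github.com/zatol/hls-allinone | free-hls-master/web/utils.py | is_base64_code
-- ===== SOURCE A (Python) =====
-- def is_base64_code(s):
--   _base64_code = ['A', 'B', 'C', 'D', 'E', 'F', 'G', 'H', 'I',
--                   'J', 'K', 'L', 'M', 'N', 'O', 'P', 'Q', 'R',
--                   'S', 'T', 'U', 'V', 'W', 'X', 'Y', 'Z', 'a',
--                   'b', 'c', 'd', 'e', 'f', 'g', 'h', 'i', 'j',
--                   'k', 'l', 'm', 'n', 'o', 'p', 'q', 'r', 's',
--                   't', 'u', 'v', 'w', 'x', 'y', 'z', '0', '1',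
--                   '2', '3', '4', '5', '6', '7', '8', '9', '+',
--                   '/', '=']
--   # Check base64 OR codeCheck % 4
--   code_fail = [i for i in s if i not in _base64_code]
--   if code_fail or len(s) % 4 != 0:
--     return False
--   return True
-- ===== SOURCE B (Python) =====
-- _B64 = frozenset('ABCDEFGHIJKLMNOPQRSTUVWXYZabcdefghijklmnopqrstuvwxyz0123456789+/=')
--
-- def is_base64_code(s):
--   # Consume the string in 4-character blocks; the length-mod-4 condition
--   # falls out of the chunking (a leftover partial block means False).
--   i, n = 0, len(s)
--   while i + 4 <= n:
--     if not _B64.issuperset(s[i:i+4]):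
--       return False
--     i += 4
--   return i == n
-- ===== Notes on version B (the rewrite author's own statement) =====
-- stated objective: alternative
-- what changed: B consumes the string in 4-character blocks with a frozenset superset test per block, so the length%4==0 condition emerges from the chunking itself (a leftover partial block fails), instead of A's build-a-list-of-failing-characters scan plus a separate modulo check.
import Mathlib
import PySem

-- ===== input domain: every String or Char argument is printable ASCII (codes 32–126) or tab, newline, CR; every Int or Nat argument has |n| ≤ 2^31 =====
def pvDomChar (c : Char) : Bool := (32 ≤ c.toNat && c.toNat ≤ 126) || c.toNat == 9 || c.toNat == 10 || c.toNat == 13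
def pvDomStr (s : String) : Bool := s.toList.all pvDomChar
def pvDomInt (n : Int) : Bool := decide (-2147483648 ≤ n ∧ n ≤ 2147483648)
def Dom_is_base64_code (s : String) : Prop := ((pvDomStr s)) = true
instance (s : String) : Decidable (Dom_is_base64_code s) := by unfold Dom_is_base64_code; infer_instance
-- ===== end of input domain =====

-- B consumes the string in 4-character blocks (set-superset test per block), so the
-- length%4 condition falls out of the chunking, instead of A's failing-character list
-- plus separate modulo check; objective: alternative decomposition.


-- ===== PORT A =====
def pvBase64Code : List Char :=
  ['A','B','C','D','E','F','G','H','I','J','K','L','M','N','O','P','Q','R',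
   'S','T','U','V','W','X','Y','Z','a','b','c','d','e','f','g','h','i','j',
   'k','l','m','n','o','p','q','r','s','t','u','v','w','x','y','z','0','1',
   '2','3','4','5','6','7','8','9','+','/','=']

def is_base64_code (s : String) : Bool :=
  let code_fail := s.toList.filter (fun c => !(pvBase64Code.contains c))
  if code_fail ≠ [] ∨ s.toList.length % 4 ≠ 0 then false else true

-- ===== PORT B =====
-- the frozenset of the 65 distinct base64 characters; membership in it is exactly
-- membership in this duplicate-free character list
def pvB64Chars : List Char :=
  "ABCDEFGHIJKLMNOPQRSTUVWXYZabcdefghijklmnopqrstuvwxyz0123456789+/=".toList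

-- B's while-loop: each iteration takes the next 4-character block (the superset test
-- checks all four characters); a leftover partial block (the catch-all) returns false.
def pvAltGo : List Char → Bool
  | a :: b :: c :: d :: rest =>
      if [a, b, c, d].all pvB64Chars.contains then pvAltGo rest else false
  | [] => true
  | _ => false

def is_base64_code_alt (s : String) : Bool := pvAltGo s.toList

-- ===== PRECONDITION & SPEC =====
def Spec_is_base64_code (s : String) (out : Bool) : Prop := out = is_base64_code_alt s
instance (s : String) (out : Bool) : Decidable (Spec_is_base64_code s out) := by unfold Spec_is_base64_code; infer_instance

-- ===== CLAIM (what is proved, stated in full; the proofs are below) =====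
def Claim_equal_is_base64_code : Prop := ∀ (s : String), Dom_is_base64_code s → Spec_is_base64_code s (is_base64_code s)

-- ===== LEMMAS AND PROOFS =====

theorem pvB64Chars_eq : pvB64Chars = pvBase64Code := by decide

theorem pvAltGo_eq (l : List Char) :
    pvAltGo l = (l.all pvB64Chars.contains && (l.length % 4 == 0)) := by
  fun_induction pvAltGo l with
  | case1 a b c d rest h ih =>
      simp only [List.all_cons, List.all_nil, Bool.and_true, Bool.and_eq_true] at h
      obtain ⟨ha, hb, hc, hd⟩ := h
      have hm : (rest.length + 1 + 1 + 1 + 1) % 4 = rest.length % 4 := by omega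
      simp only [List.all_cons, List.length_cons, ih, hm, ha, hb, hc, hd, Bool.true_and]
  | case2 a b c d rest h =>
      revert h
      simp only [List.all_cons, List.all_nil, Bool.and_true, List.length_cons]
      cases pvB64Chars.contains a <;> cases pvB64Chars.contains b <;>
        cases pvB64Chars.contains c <;> cases pvB64Chars.contains d <;> simp
  | case3 => simp
  | case4 l h1 h2 =>
      -- leftover partial block: 1 ≤ length ≤ 3, so length % 4 ≠ 0
      match l, h1, h2 with
      | [a], _, _ => simp
      | [a, b], _, _ => simp
      | [a, b, c], _, _ => simp
      | [], _, h2 => exact absurd rfl h2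
      | a :: b :: c :: d :: rest, h1, _ => exact absurd rfl (h1 a b c d rest)

theorem is_base64_code_spec : Claim_equal_is_base64_code := by
  intro s _
  unfold Spec_is_base64_code is_base64_code is_base64_code_alt
  rw [pvAltGo_eq, pvB64Chars_eq]
  show (if (s.toList.filter (fun c => !(pvBase64Code.contains c)) ≠ [] ∨ s.toList.length % 4 ≠ 0)
      then false else true) = (s.toList.all pvBase64Code.contains && (s.toList.length % 4 == 0))
  have hfilt : (s.toList.filter (fun c => !(pvBase64Code.contains c)) = [])
      ↔ s.toList.all pvBase64Code.contains = true := by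
    simp [List.filter_eq_nil_iff, List.all_eq_true]
  split_ifs with h
  · rcases h with h | h
    · have : s.toList.all pvBase64Code.contains = false := by
        rw [Bool.eq_false_iff]; intro ha; exact h (hfilt.mpr ha)
      simp [this]
    · have hlen : s.toList.length = s.length := by simp
      rw [hlen] at h
      simp [hlen, h]
  · push Not at h
    obtain ⟨h1, h2⟩ := h
    have hlen : s.toList.length = s.length := by simp
    rw [hlen] at h2
    simp [hfilt.mp h1, hlen, h2]
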